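-- pv_equiv track=rewrite | github.com/jcallano/opencockpit-wireless-bus | tools/test_node_d.py | calc_crc8
-- ===== SOURCE A (Python) =====
-- def calc_crc8(data):
--     crc = 0x00
--     for byte in data:
--         crc ^= byte
--         for _ in range(8):
--             if crc & 0x01:
--                 crc = (crc >> 1) ^ 0x8C
--             else:
--                 crc >>= 1
--     return crc
-- ===== SOURCE B (Python) =====
-- # Table-driven CRC-8 (poly 0x8C, reflected): one precomputed-table lookup per byte
-- # instead of 8 bit-serial rounds per byte.
-- _CRC8_TABLE = []
-- for _i in range(256):
--     _c = _i
--     for _ in range(8):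
--         _c = ((_c >> 1) ^ 0x8C) if (_c & 0x01) else (_c >> 1)
--     _CRC8_TABLE.append(_c)
--
--
-- def calc_crc8(data):
--     crc = 0x00
--     for byte in data:
--         x = crc ^ byte
--         crc = (x >> 8) ^ _CRC8_TABLE[x & 0xFF]
--     return crc
-- ===== Notes on version B (the rewrite author's own statement) =====
-- stated objective: faster
-- what changed: Replaced the 8-round bit-serial CRC loop per byte with a precomputed 256-entry lookup table: one table lookup plus one shift/xor per byte.
import Mathlib
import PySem

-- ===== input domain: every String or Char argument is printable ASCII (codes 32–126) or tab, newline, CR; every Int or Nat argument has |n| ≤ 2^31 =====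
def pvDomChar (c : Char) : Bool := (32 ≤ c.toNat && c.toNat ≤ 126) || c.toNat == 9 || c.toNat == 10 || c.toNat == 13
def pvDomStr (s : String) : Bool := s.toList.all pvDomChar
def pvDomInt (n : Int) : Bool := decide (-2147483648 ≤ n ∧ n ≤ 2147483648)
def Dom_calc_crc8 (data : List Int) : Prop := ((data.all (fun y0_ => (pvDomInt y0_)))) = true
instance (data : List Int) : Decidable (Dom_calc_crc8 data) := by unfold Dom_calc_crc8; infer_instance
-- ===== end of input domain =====

-- B replaces A's 8-round bit-serial inner loop per byte with a precomputed 256-entry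
-- CRC table: one table lookup plus one shift/xor per byte (objective: faster).

-- ===== PORT A =====
def calc_crc8 (data : List Int) : Int :=
  data.foldl
    (fun crc byte =>
      (PySem.List.pyRange 0 8 1).foldl
        (fun crc _ =>
          if PySem.Int.band crc 1 ≠ 0 then
            PySem.Int.bxor (crc >>> (1 : Nat)) 140
          else
            crc >>> (1 : Nat))
        (PySem.Int.bxor crc byte))
    0

-- ===== PORT B =====
-- table builder: for each i in range(256), run the 8 halving rounds on i and collect
def crc8TableEntry (i : Int) : Int :=
  (PySem.List.pyRange 0 8 1).foldl
    (fun c _ =>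
      if PySem.Int.band c 1 ≠ 0 then
        PySem.Int.bxor (c >>> (1 : Nat)) 140
      else
        c >>> (1 : Nat))
    i

def crc8Table : List Int := (PySem.List.pyRange 0 256 1).map crc8TableEntry

def calc_crc8_alt (data : List Int) : Int :=
  data.foldl
    (fun crc byte =>
      let x := PySem.Int.bxor crc byte
      PySem.Int.bxor (x >>> (8 : Nat)) (PySem.List.pyGetD crc8Table (PySem.Int.band x 255) 0))
    0

-- ===== PRECONDITION & SPEC =====
def Spec_calc_crc8 (data : List Int) (out : Int) : Prop := out = calc_crc8_alt data
instance (data : List Int) (out : Int) : Decidable (Spec_calc_crc8 data out) := by unfold Spec_calc_crc8; infer_instance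

-- ===== CLAIM (what is proved, stated in full; the proofs are below) =====
def Claim_equal_calc_crc8 : Prop := ∀ (data : List Int), Dom_calc_crc8 data → Spec_calc_crc8 data (calc_crc8 data)

-- ===== LEMMAS AND PROOFS =====

-- the shared one-bit CRC round (the body of A's inner loop and of B's table builder)
def pvRound (c : Int) : Int :=
  if PySem.Int.band c 1 ≠ 0 then PySem.Int.bxor (c >>> (1 : Nat)) 140 else c >>> (1 : Nat)

def pvRoundN (r : Nat) : Nat :=
  if r.testBit 0 then (r >>> 1) ^^^ 140 else r >>> 1

theorem tb_natCast (r : Nat) (i : Nat) : ((r : Int)).testBit i = r.testBit i := rfl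

theorem pv_bxor_eq_xor (a b : Int) : PySem.Int.bxor a b = Int.xor a b := by
  cases a with
  | ofNat m =>
    cases b with
    | ofNat n => simp [PySem.Int.bxor, Int.xor, Int.ofNat_eq_natCast]
    | negSucc n =>
      simp [PySem.Int.bxor, Int.xor, Int.negSucc_eq]
      omega
  | negSucc m =>
    cases b with
    | ofNat n =>
      simp [PySem.Int.bxor, Int.xor, Int.negSucc_eq]
      omega
    | negSucc n =>
      simp [PySem.Int.bxor, Int.xor, Int.negSucc_eq]
      omega

theorem pv_tb_bxor (a b : Int) (i : Nat) :
    (PySem.Int.bxor a b).testBit i = ((a.testBit i) ^^ (b.testBit i)) := by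
  rw [pv_bxor_eq_xor]; exact Int.testBit_lxor a b i

theorem pv_tb_shr (x : Int) (k i : Nat) : (x >>> k).testBit i = x.testBit (k + i) := by
  cases x with
  | ofNat m =>
    change (Int.ofNat (m >>> k)).testBit i = _
    simp [Int.testBit, Nat.testBit_shiftRight]
  | negSucc m =>
    change (Int.negSucc (m >>> k)).testBit i = _
    simp [Int.testBit, Nat.testBit_shiftRight]

theorem pv_int_ext {m n : Int} (h : ∀ i, m.testBit i = n.testBit i) : m = n := by
  cases m with
  | ofNat a =>
    cases n with
    | ofNat b =>
      have : a = b := Nat.eq_of_testBit_eq (fun i => by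
        have := h i; simpa [Int.testBit] using this)
      simp [this]
    | negSucc b =>
      exfalso
      have h1 := h (a + b + 1)
      have ha : a.testBit (a + b + 1) = false := Nat.testBit_lt_two_pow (by
        calc a < 2 ^ a := Nat.lt_two_pow_self
        _ ≤ 2 ^ (a + b + 1) := Nat.pow_le_pow_right (by norm_num) (by omega))
      have hb : b.testBit (a + b + 1) = false := Nat.testBit_lt_two_pow (by
        calc b < 2 ^ b := Nat.lt_two_pow_self
        _ ≤ 2 ^ (a + b + 1) := Nat.pow_le_pow_right (by norm_num) (by omega))
      simp [Int.testBit, ha, hb] at h1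
  | negSucc a =>
    cases n with
    | ofNat b =>
      exfalso
      have h1 := h (a + b + 1)
      have ha : a.testBit (a + b + 1) = false := Nat.testBit_lt_two_pow (by
        calc a < 2 ^ a := Nat.lt_two_pow_self
        _ ≤ 2 ^ (a + b + 1) := Nat.pow_le_pow_right (by norm_num) (by omega))
      have hb : b.testBit (a + b + 1) = false := Nat.testBit_lt_two_pow (by
        calc b < 2 ^ b := Nat.lt_two_pow_self
        _ ≤ 2 ^ (a + b + 1) := Nat.pow_le_pow_right (by norm_num) (by omega))
      simp [Int.testBit, ha, hb] at h1
    | negSucc b =>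
      have : a = b := Nat.eq_of_testBit_eq (fun i => by
        have := h i; simpa [Int.testBit] using this)
      simp [this]

theorem pv_mod2_testBit (x : Int) : x % 2 = if x.testBit 0 then 1 else 0 := by
  cases x with
  | ofNat m =>
    have h : m.testBit 0 = decide (m % 2 = 1) := Nat.testBit_zero m
    have h2 : (Int.ofNat m) % 2 = ((m % 2 : Nat) : Int) := by
      simp [Int.ofNat_eq_natCast]
    rw [h2]
    simp only [Int.testBit, h]
    rcases Nat.mod_two_eq_zero_or_one m with hm | hm <;> simp [hm]
  | negSucc m =>
    have h : m.testBit 0 = decide (m % 2 = 1) := Nat.testBit_zero m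
    have h2 : (Int.negSucc m) % 2 = 1 - ((m % 2 : Nat) : Int) := by
      rw [Int.negSucc_eq]; omega
    rw [h2]
    simp only [Int.testBit, h]
    rcases Nat.mod_two_eq_zero_or_one m with hm | hm <;> simp [hm]

theorem pv_band1 (x : Int) : PySem.Int.band x 1 = if x.testBit 0 then 1 else 0 := by
  rw [PySem.Int.band_one, PySem.Int.mod_eq_emod_of_pos (by norm_num)]
  exact pv_mod2_testBit x

theorem pv_shr1_bxor (a b : Int) :
    (PySem.Int.bxor a b) >>> (1 : Nat) = PySem.Int.bxor (a >>> (1 : Nat)) (b >>> (1 : Nat)) := by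
  apply pv_int_ext; intro i
  simp [pv_tb_shr, pv_tb_bxor]

theorem pv_bxor_assoc (a b c : Int) :
    PySem.Int.bxor (PySem.Int.bxor a b) c = PySem.Int.bxor a (PySem.Int.bxor b c) := by
  apply pv_int_ext; intro i
  simp [pv_tb_bxor]

theorem pv_two_mul_negSucc (p : Nat) : (2 : Int) * Int.negSucc p = Int.negSucc (2 * p + 1) := by
  rw [Int.negSucc_eq, Int.negSucc_eq]; push_cast; ring

theorem pv_tb_two_mul (h : Int) : (2 * h).testBit 0 = false := by
  cases h with
  | ofNat p =>
    have e : (2 : Int) * Int.ofNat p = Int.ofNat (2 * p) := by simp [Int.ofNat_eq_natCast]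
    rw [e]
    simp [Int.testBit, Nat.testBit_zero, Nat.mul_mod_right]
  | negSucc p =>
    rw [pv_two_mul_negSucc]
    simp [Int.testBit, Nat.testBit_zero]

theorem pv_two_mul_shr1 (h : Int) : (2 * h) >>> (1 : Nat) = h := by
  cases h with
  | ofNat p =>
    have e : (2 : Int) * Int.ofNat p = Int.ofNat (2 * p) := by simp [Int.ofNat_eq_natCast]
    rw [e]
    change Int.ofNat ((2 * p) >>> 1) = _
    congr 1
    omega
  | negSucc p =>
    rw [pv_two_mul_negSucc]
    change Int.negSucc ((2 * p + 1) >>> 1) = _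
    congr 1
    omega

theorem pv_round_natCast (r : Nat) : pvRound (r : Int) = ((pvRoundN r : Nat) : Int) := by
  have hb : PySem.Int.band (r : Int) 1 = ((r &&& 1 : Nat) : Int) := by
    exact_mod_cast PySem.Int.band_natCast r 1
  have hs : ((r : Int) >>> (1 : Nat)) = ((r >>> 1 : Nat) : Int) := rfl
  have hx : PySem.Int.bxor ((r >>> 1 : Nat) : Int) 140 = (((r >>> 1) ^^^ 140 : Nat) : Int) := by
    exact_mod_cast PySem.Int.bxor_natCast (r >>> 1) 140
  have ht : (r &&& 1) = (if r.testBit 0 then 1 else 0) := by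
    rw [Nat.and_one_is_mod, Nat.testBit_zero]
    rcases Nat.mod_two_eq_zero_or_one r with h | h <;> simp [h]
  unfold pvRound pvRoundN
  rw [hb, ht]
  by_cases h : r.testBit 0
  · simp only [h, if_true]
    norm_num
    rw [hs, hx]
  · simp only [h]
    norm_num

theorem pv_round_split (h : Int) (r : Nat) :
    pvRound (PySem.Int.bxor (2 * h) (r : Int)) = PySem.Int.bxor h (pvRound (r : Int)) := by
  have htb : (PySem.Int.bxor (2 * h) (r : Int)).testBit 0 = r.testBit 0 := by
    rw [pv_tb_bxor, pv_tb_two_mul, tb_natCast]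
    simp
  unfold pvRound
  rw [pv_band1, pv_band1, htb, tb_natCast]
  by_cases hr : r.testBit 0
  · simp [hr, pv_shr1_bxor, pv_two_mul_shr1, pv_bxor_assoc]
  · simp [hr, pv_shr1_bxor, pv_two_mul_shr1]

theorem pv_iter (k : Nat) (h : Int) : ∀ (r : Nat),
    pvRound^[k] (PySem.Int.bxor (((2 ^ k : Nat) : Int) * h) (r : Int))
      = PySem.Int.bxor h (pvRound^[k] (r : Int)) := by
  induction k with
  | zero => intro r; simp
  | succ k ih =>
    intro r
    have h2 : ((2 ^ (k + 1) : Nat) : Int) * h = 2 * (((2 ^ k : Nat) : Int) * h) := by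
      push_cast; ring
    rw [Function.iterate_succ_apply, Function.iterate_succ_apply, h2, pv_round_split,
      pv_round_natCast]
    exact ih (pvRoundN r)

set_option maxRecDepth 8192 in
theorem pv_sub255 : ∀ t < 256, ∀ j < 8, (255 - t : Nat).testBit j = !t.testBit j := by decide

theorem pv_255_testBit : ∀ j < 8, (255 : Nat).testBit j = true := by decide

theorem pv_negSucc_emod (m : Nat) : (Int.negSucc m) % 256 = ((255 - m % 256 : Nat) : Int) := by
  rw [Int.negSucc_eq]; omega

theorem pv_tb_256mul (h : Int) (i : Nat) :
    ((256 : Int) * h).testBit i = if i < 8 then false else h.testBit (i - 8) := by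
  cases h with
  | ofNat p =>
    have e : (256 : Int) * Int.ofNat p = Int.ofNat (2 ^ 8 * p) := by
      simp [Int.ofNat_eq_natCast]
    rw [e]
    simp only [Int.testBit]
    rw [show 2 ^ 8 * p = 2 ^ 8 * p + 0 by ring,
      Nat.testBit_two_pow_mul_add p (show (0 : Nat) < 2 ^ 8 by norm_num) i]
    simp [Nat.zero_testBit]
  | negSucc p =>
    have e : (256 : Int) * Int.negSucc p = Int.negSucc (2 ^ 8 * p + 255) := by
      rw [Int.negSucc_eq, Int.negSucc_eq]; push_cast; ring
    rw [e]
    simp only [Int.testBit]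
    rw [Nat.testBit_two_pow_mul_add p (show (255 : Nat) < 2 ^ 8 by norm_num) i]
    by_cases hi : i < 8
    · simp [hi, pv_255_testBit i hi]
    · simp [hi]

theorem pv_tb_mod256 (x : Int) (i : Nat) (hi : i < 8) :
    ((x % 256).toNat).testBit i = x.testBit i := by
  cases x with
  | ofNat m =>
    have e : (Int.ofNat m % 256) = ((m % 256 : Nat) : Int) := by
      rw [Int.ofNat_eq_natCast]; omega
    rw [e, Int.toNat_natCast]
    rw [show (256 : Nat) = 2 ^ 8 by norm_num, Nat.testBit_mod_two_pow]
    simp [Int.testBit, hi]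
  | negSucc m =>
    rw [pv_negSucc_emod, Int.toNat_natCast,
      pv_sub255 (m % 256) (Nat.mod_lt _ (by norm_num)) i hi,
      show (256 : Nat) = 2 ^ 8 by norm_num, Nat.testBit_mod_two_pow]
    simp [Int.testBit, hi]

theorem pv_dec (x : Int) :
    PySem.Int.bxor (256 * (x >>> (8 : Nat))) (((x % 256).toNat : Nat) : Int) = x := by
  apply pv_int_ext; intro i
  rw [pv_tb_bxor, pv_tb_256mul]
  by_cases hi : i < 8
  · simp only [hi, if_true, Bool.false_xor]
    rw [tb_natCast, pv_tb_mod256 x i hi]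
  · simp only [hi, if_false]
    have hlt : (x % 256).toNat < 2 ^ i := by
      have h1 : (x % 256).toNat < 256 := by omega
      calc (x % 256).toNat < 256 := h1
        _ = 2 ^ 8 := by norm_num
        _ ≤ 2 ^ i := Nat.pow_le_pow_right (by norm_num) (by omega)
    rw [tb_natCast, Nat.testBit_lt_two_pow hlt]
    simp only [Bool.xor_false]
    rw [pv_tb_shr]
    congr 1
    omega

theorem pv_band255 (x : Int) : PySem.Int.band x 255 = x % 256 := by
  cases x with
  | ofNat m =>
    have e : PySem.Int.band (Int.ofNat m) 255 = ((m &&& 255 : Nat) : Int) := by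
      exact_mod_cast PySem.Int.band_natCast m 255
    rw [e, show (255 : Nat) = 2 ^ 8 - 1 by norm_num, Nat.and_two_pow_sub_one_eq_mod]
    simp [Int.ofNat_eq_natCast]
  | negSucc m =>
    have h0 : ¬ (0 : Int) ≤ Int.negSucc m := by rw [Int.negSucc_eq]; omega
    unfold PySem.Int.band
    rw [if_neg h0, if_pos (by norm_num : (0 : Int) ≤ 255)]
    have h1 : (-(Int.negSucc m) - 1) = (m : Int) := by rw [Int.negSucc_eq]; ring
    rw [h1, pv_negSucc_emod]
    have h2 : (255 : Nat) &&& m = m % 256 := by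
      rw [Nat.and_comm, show (255 : Nat) = 2 ^ 8 - 1 by norm_num,
        Nat.and_two_pow_sub_one_eq_mod]
    simp only [Int.toNat_natCast, show ((255 : Int)).toNat = 255 from rfl, h2]

theorem pv_byte_fold (c : Int) :
    (PySem.List.pyRange 0 8 1).foldl
      (fun c _ =>
        if PySem.Int.band c 1 ≠ 0 then PySem.Int.bxor (c >>> (1 : Nat)) 140
        else c >>> (1 : Nat)) c
      = pvRound^[8] c := by
  have h : PySem.List.pyRange 0 8 1 = [0, 1, 2, 3, 4, 5, 6, 7] := by decide
  rw [h]
  rfl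

theorem pv_key (x : Int) :
    pvRound^[8] x
      = PySem.Int.bxor (x >>> (8 : Nat)) (pvRound^[8] (((x % 256).toNat : Nat) : Int)) := by
  conv_lhs => rw [← pv_dec x]
  rw [show (256 : Int) * (x >>> (8 : Nat))
        = ((2 ^ 8 : Nat) : Int) * (x >>> (8 : Nat)) by norm_num]
  exact pv_iter 8 (x >>> (8 : Nat)) (x % 256).toNat

theorem pv_step (crc byte : Int) :
    (PySem.List.pyRange 0 8 1).foldl
      (fun c _ =>
        if PySem.Int.band c 1 ≠ 0 then PySem.Int.bxor (c >>> (1 : Nat)) 140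
        else c >>> (1 : Nat)) (PySem.Int.bxor crc byte)
      = (let x := PySem.Int.bxor crc byte
         PySem.Int.bxor (x >>> (8 : Nat)) (PySem.List.pyGetD crc8Table (PySem.Int.band x 255) 0)) := by
  show _ = PySem.Int.bxor ((PySem.Int.bxor crc byte) >>> (8 : Nat))
      (PySem.List.pyGetD crc8Table (PySem.Int.band (PySem.Int.bxor crc byte) 255) 0)
  rw [pv_byte_fold, pv_band255]
  have h0 : (0 : Int) ≤ (PySem.Int.bxor crc byte) % 256 := Int.emod_nonneg _ (by norm_num)
  have h1 : (PySem.Int.bxor crc byte) % 256 < 256 := Int.emod_lt_of_pos _ (by norm_num)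
  unfold crc8Table
  rw [PySem.List.pyGetD_map_pyRange_of_nonneg crc8TableEntry 256 _ 0 h0 h1]
  have e : crc8TableEntry ((PySem.Int.bxor crc byte) % 256)
      = pvRound^[8] ((((PySem.Int.bxor crc byte) % 256).toNat : Nat) : Int) := by
    unfold crc8TableEntry
    rw [pv_byte_fold, Int.toNat_of_nonneg h0]
  rw [e, pv_key]

theorem pv_fold_eq (data : List Int) : ∀ (crc : Int),
    data.foldl
      (fun crc byte =>
        (PySem.List.pyRange 0 8 1).foldl
          (fun crc _ =>
            if PySem.Int.band crc 1 ≠ 0 then PySem.Int.bxor (crc >>> (1 : Nat)) 140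
            else crc >>> (1 : Nat))
          (PySem.Int.bxor crc byte)) crc
      = data.foldl
          (fun crc byte =>
            let x := PySem.Int.bxor crc byte
            PySem.Int.bxor (x >>> (8 : Nat)) (PySem.List.pyGetD crc8Table (PySem.Int.band x 255) 0)) crc := by
  induction data with
  | nil => intro crc; rfl
  | cons b bs ih =>
      intro crc
      simp only [List.foldl_cons]
      rw [pv_step crc b]
      exact ih _

-- ===== VERDICT (by name: the statement is the Claim_ definition above) =====
theorem calc_crc8_spec : Claim_equal_calc_crc8 := by
  intro data _
  unfold Spec_calc_crc8 calc_crc8 calc_crc8_alt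
  exact pv_fold_eq data 0
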